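-- pv_equiv track=rewrite | github.com/hzauzengyuanzhao/octopus | preprocess/get_dataset.py | _is_position_excluded_static
-- ===== SOURCE A (Python) =====
-- def _is_position_excluded_static(chrom, start, end, exclude_dict):
--     if not exclude_dict or chrom not in exclude_dict:
--         return False
--     regions = exclude_dict[chrom]
--     low, high = 0, len(regions) - 1
--     while low <= high:
--         mid = (low + high) // 2
--         rs, re = regions[mid]
--         if start < re and end > rs:  # 有重叠
--             return True
--         if end <= rs:
--             high = mid - 1
--         else:
--             low = mid + 1
--     return False
-- ===== SOURCE B (Python) =====
-- def _is_position_excluded_static(chrom, start, end, exclude_dict):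
--     if not exclude_dict or chrom not in exclude_dict:
--         return False
--
--     def go(regions):
--         if not regions:
--             return False
--         mid = (len(regions) - 1) // 2
--         rs, re = regions[mid]
--         if start < re and end > rs:
--             return True
--         return go(regions[:mid] if end <= rs else regions[mid + 1:])
--
--     return go(exclude_dict[chrom])
-- ===== Notes on version B (the rewrite author's own statement) =====
-- stated objective: alternative
-- what changed: A's index-based while-loop binary search with mutable low/high bounds over the full list is replaced by structural recursion on a shrinking sublist: B probes the middle element and recurses on the left slice regions[:mid] or right slice regions[mid+1:], carrying no indices at all; it probes the same elements in the same order, so the result is identical.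
import Mathlib
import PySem

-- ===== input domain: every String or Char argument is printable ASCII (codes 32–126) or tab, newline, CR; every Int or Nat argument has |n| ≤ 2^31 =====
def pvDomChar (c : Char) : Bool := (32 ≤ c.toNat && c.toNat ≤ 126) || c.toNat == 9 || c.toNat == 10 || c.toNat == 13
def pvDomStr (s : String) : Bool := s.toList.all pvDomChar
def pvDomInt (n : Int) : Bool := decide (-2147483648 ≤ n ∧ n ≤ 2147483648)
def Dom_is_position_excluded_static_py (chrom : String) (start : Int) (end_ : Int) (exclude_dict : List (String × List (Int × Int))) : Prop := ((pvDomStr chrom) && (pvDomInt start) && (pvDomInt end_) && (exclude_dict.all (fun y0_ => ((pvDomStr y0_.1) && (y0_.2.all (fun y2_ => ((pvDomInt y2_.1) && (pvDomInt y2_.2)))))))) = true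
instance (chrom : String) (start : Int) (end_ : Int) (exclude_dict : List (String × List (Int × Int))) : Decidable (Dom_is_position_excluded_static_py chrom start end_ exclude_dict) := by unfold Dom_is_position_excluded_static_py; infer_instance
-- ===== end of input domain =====

-- B keeps the guard but replaces A's index-based while-loop (mutable low/high over the
-- whole list) by structural recursion on a shrinking sublist: probe the middle element,
-- then recurse on the left or right half obtained by slicing (alternative decomposition).

-- ===== PORT A =====
-- A's while-loop: state (low, high), body in source order; fuel is only a totality
-- guard ((high+1-low).toNat shrinks each iteration, so fuel = regions.length suffices)
def pvLoopA (start end_ : Int) (regions : List (Int × Int)) : Nat → Int → Int → Bool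
  | 0, _, _ => false
  | fuel + 1, low, high =>
    if low ≤ high then
      let mid := PySem.Int.floordiv (low + high) 2
      match PySem.List.pyGet? regions mid with
      | none => false   -- unreachable: 0 ≤ low ≤ mid ≤ high ≤ len-1 at every call from the port
      | some (rs, re) =>
        if start < re ∧ end_ > rs then true
        else if end_ ≤ rs then pvLoopA start end_ regions fuel low (mid - 1)
        else pvLoopA start end_ regions fuel (mid + 1) high
    else false

def is_position_excluded_static_py (chrom : String) (start : Int) (end_ : Int) (exclude_dict : List (String × List (Int × Int))) : Bool :=
  if exclude_dict.isEmpty ∨ (exclude_dict.lookup chrom).isNone then false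
  else
    match exclude_dict.lookup chrom with
    | none => false    -- unreachable: the guard above already returned false
    | some regions => pvLoopA start end_ regions regions.length 0 ((regions.length : Int) - 1)

-- ===== PORT B =====
-- Source B's go: structural recursion on the current sublist; regions[:mid] / regions[mid+1:]
-- are List.take mid / List.drop (mid+1) (slices with nonnegative in-range bounds)
def pvGoB (start end_ : Int) (regions : List (Int × Int)) : Bool :=
  if regions.isEmpty then false
  else
    let mid := (regions.length - 1) / 2
    match regions[mid]? with
    | none => false   -- unreachable: mid < length since regions is nonempty
    | some (rs, re) =>
      if start < re ∧ end_ > rs then true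
      else if end_ ≤ rs then pvGoB start end_ (regions.take mid)
      else pvGoB start end_ (regions.drop (mid + 1))
termination_by regions.length
decreasing_by
  · simp only [List.length_take, List.isEmpty_iff_length_eq_zero] at *; omega
  · simp only [List.length_drop, List.isEmpty_iff_length_eq_zero] at *; omega

def is_position_excluded_static_py_alt (chrom : String) (start : Int) (end_ : Int) (exclude_dict : List (String × List (Int × Int))) : Bool :=
  if exclude_dict.isEmpty ∨ (exclude_dict.lookup chrom).isNone then false
  else pvGoB start end_ ((exclude_dict.lookup chrom).getD [])

-- ===== PRECONDITION & SPEC =====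
def Spec_is_position_excluded_static_py (chrom : String) (start : Int) (end_ : Int) (exclude_dict : List (String × List (Int × Int))) (out : Bool) : Prop := out = is_position_excluded_static_py_alt chrom start end_ exclude_dict
instance (chrom : String) (start : Int) (end_ : Int) (exclude_dict : List (String × List (Int × Int))) (out : Bool) : Decidable (Spec_is_position_excluded_static_py chrom start end_ exclude_dict out) := by unfold Spec_is_position_excluded_static_py; infer_instance

-- ===== CLAIM =====
def Claim_equal_is_position_excluded_static_py : Prop := ∀ (chrom : String) (start : Int) (end_ : Int) (exclude_dict : List (String × List (Int × Int))), Dom_is_position_excluded_static_py chrom start end_ exclude_dict → Spec_is_position_excluded_static_py chrom start end_ exclude_dict (is_position_excluded_static_py chrom start end_ exclude_dict)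

-- ===== LEMMAS AND PROOFS =====
-- A's loop on window [low, high] of `regions` equals B's recursion on the sublist
-- regions[low .. high] (drop low, take the window length), provided the window is in range
-- and the fuel covers the window size.
theorem pvLoopA_eq_pvGoB (start end_ : Int) (regions : List (Int × Int)) (fuel : Nat) (low high : Int)
    (hlo : 0 ≤ low) (hhi : high < regions.length)
    (hfuel : (high + 1 - low).toNat ≤ fuel) :
    pvLoopA start end_ regions fuel low high
      = pvGoB start end_ ((regions.drop low.toNat).take (high + 1 - low).toNat) := by
  induction fuel generalizing low high with
  | zero =>
    have h0 : (high + 1 - low).toNat = 0 := by omega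
    rw [h0]
    simp [pvLoopA, pvGoB]
  | succ fuel ih =>
    by_cases hlh : low ≤ high
    · set a := low.toNat with ha
      set m := (high + 1 - low).toNat with hm
      set j := (m - 1) / 2 with hj
      have hm1 : 1 ≤ m := by omega
      have hjm : j < m := by omega
      have haj : a + m ≤ regions.length := by omega
      have hsublen : ((regions.drop a).take m).length = m := by
        simp; omega
      have hmid : PySem.Int.floordiv (low + high) 2 = ((a + j : Nat) : Int) := by
        rw [PySem.Int.floordiv_eq_ediv_of_pos (by norm_num)]; omega
      have hidx : (a + j) < regions.length := by omega
      have hgetA : PySem.List.pyGet? regions (PySem.Int.floordiv (low + high) 2)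
          = some regions[a + j] := by
        rw [hmid, PySem.List.pyGet?_natCast, List.getElem?_eq_getElem hidx]
      have hgetB : ((regions.drop a).take m)[j]? = some regions[a + j] := by
        rw [List.getElem?_take_of_lt hjm, List.getElem?_drop,
          List.getElem?_eq_getElem hidx]
      set p := regions[a + j] with hp
      obtain ⟨rs, re⟩ := p
      rw [pvLoopA, if_pos hlh, pvGoB]
      rw [if_neg (by simp; omega)]
      simp only [hgetA, hsublen, hj.symm, hgetB]
      by_cases hov : start < re ∧ end_ > rs
      · rw [if_pos hov, if_pos hov]
      · rw [if_neg hov, if_neg hov]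
        by_cases hle : end_ ≤ rs
        · rw [if_pos hle, if_pos hle]
          have hwin : (low + high) / 2 - 1 < (regions.length : Int) := by omega
          have := ih low (PySem.Int.floordiv (low + high) 2 - 1) hlo
            (by rw [hmid]; omega) (by rw [hmid]; omega)
          rw [this, hmid]
          have e1 : ((((a + j : Nat) : Int) - 1 + 1 - low).toNat) = j := by omega
          rw [e1, List.take_take, min_eq_left (le_of_lt hjm)]
        · rw [if_neg hle, if_neg hle]
          have := ih (PySem.Int.floordiv (low + high) 2 + 1) high
            (by rw [hmid]; omega) hhi (by rw [hmid]; omega)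
          rw [this, hmid]
          have e2 : (((a + j : Nat) : Int) + 1).toNat = a + (j + 1) := by omega
          have e3 : (high + 1 - (((a + j : Nat) : Int) + 1)).toNat = m - (j + 1) := by omega
          rw [e2, e3, List.drop_take, List.drop_drop]
    · have h0 : (high + 1 - low).toNat = 0 := by omega
      rw [h0, pvLoopA, if_neg hlh]
      simp [pvGoB]

-- ===== VERDICT (by name: the statement is the Claim_ definition above) =====
theorem is_position_excluded_static_py_spec : Claim_equal_is_position_excluded_static_py := by
  intro chrom start end_ exclude_dict _
  unfold Spec_is_position_excluded_static_py
  unfold is_position_excluded_static_py is_position_excluded_static_py_alt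
  cases hl : exclude_dict.lookup chrom with
  | none => simp
  | some regions =>
      simp only [Option.isNone_some, Option.getD_some]
      by_cases he : exclude_dict.isEmpty
      · exfalso; rcases exclude_dict with _ | _
        · simp at hl
        · simp [List.isEmpty] at he
      · simp only [he, Bool.false_eq_true, false_or, if_false]
        have h := pvLoopA_eq_pvGoB start end_ regions regions.length 0 ((regions.length : Int) - 1)
          (by omega) (by omega) (by omega)
        simpa using h
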